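-- pv_equiv track=rewrite | github.com/hluu3107/Website | grid/process.py | findBiconnected
-- ===== SOURCE A (Python) =====
-- def findBiconnected(adjMatrix,time):
-- 	disc = {}
-- 	low = {}
-- 	parent = {}
-- 	st = []
-- 	bc = []
-- 	for key in adjMatrix.keys():
-- 		disc[key] = -1
-- 		parent[key] = -1
-- 		low[key] = -1
-- 	for key in adjMatrix.keys():
-- 		if disc[key]==-1:
-- 			bccHelper(key,parent,low,disc,st,adjMatrix,time)
-- 		while st:
-- 			bc.append(st.pop())
-- 	return bc
--
-- def bccHelper(node,parent,low,disc,st,adjMatrix,time):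
-- 	children = 0
-- 	disc[node] = time[0]
-- 	low[node] = time[0]
-- 	time[0] += 1
-- 	for v in adjMatrix.get(node):
-- 		if disc[v]==-1:
-- 			parent[v] = node
-- 			children+=1
-- 			st.append((node,v))
-- 			bccHelper(v,parent,low,disc,st,adjMatrix,time)
--
-- 			low[node] = min(low[node],low[v])
-- 			if parent[node]==-1 and children > 1 or parent[node]!= -1 and low[v] >= disc[node]:
-- 				w = -1
-- 				while w!=(node,v):
-- 					w = st.pop()
-- 		elif v!=parent[node] and low[node] > low[v]:
-- 			low[node] = min(low[node],disc[v])
-- 			st.append((node,v))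
-- ===== SOURCE B (Python) =====
-- # Iterative biconnected-components DFS: bccHelper's recursion is replaced by an
-- # explicit stack of frames ('enter' / 'after' / 'loop'); outer loops unchanged.
-- # Note: like the original, this mutates time[0] in place (return-value equivalence).
-- def findBiconnected(adjMatrix, time):
-- 	disc = {}
-- 	low = {}
-- 	parent = {}
-- 	st = []
-- 	bc = []
-- 	for key in adjMatrix.keys():
-- 		disc[key] = -1
-- 		parent[key] = -1
-- 		low[key] = -1
-- 	for key in adjMatrix.keys():
-- 		if disc[key]==-1:
-- 			frames = [('enter', key)]
-- 			while frames:
-- 				fr = frames.pop()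
-- 				if fr[0] == 'enter':
-- 					node = fr[1]
-- 					disc[node] = time[0]
-- 					low[node] = time[0]
-- 					time[0] += 1
-- 					frames.append(('loop', node, list(adjMatrix.get(node)), 0))
-- 				elif fr[0] == 'after':
-- 					_, node, v, children = fr
-- 					low[node] = min(low[node], low[v])
-- 					if parent[node]==-1 and children > 1 or parent[node]!= -1 and low[v] >= disc[node]:
-- 						w = -1
-- 						while w!=(node,v):
-- 							w = st.pop()
-- 				else:
-- 					_, node, ns, children = fr
-- 					if ns:
-- 						v, rest = ns[0], ns[1:]
-- 						if disc[v]==-1: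
-- 							parent[v] = node
-- 							st.append((node,v))
-- 							frames.append(('loop', node, rest, children+1))
-- 							frames.append(('after', node, v, children+1))
-- 							frames.append(('enter', v))
-- 						elif v!=parent[node] and low[node] > low[v]:
-- 							low[node] = min(low[node],disc[v])
-- 							st.append((node,v))
-- 							frames.append(('loop', node, rest, children))
-- 						else:
-- 							frames.append(('loop', node, rest, children))
-- 		while st:
-- 			bc.append(st.pop())
-- 	return bc
-- ===== Notes on version B (the rewrite author's own statement) =====
-- stated objective: alternative
-- what changed: The recursive bccHelper is replaced by an iterative DFS driven by an explicit stack of enter/after/loop frames (post-child low-link update and articulation pop deferred via 'after' frames); the outer key-initialisation and stack-drain loops are unchanged.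
import Mathlib
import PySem

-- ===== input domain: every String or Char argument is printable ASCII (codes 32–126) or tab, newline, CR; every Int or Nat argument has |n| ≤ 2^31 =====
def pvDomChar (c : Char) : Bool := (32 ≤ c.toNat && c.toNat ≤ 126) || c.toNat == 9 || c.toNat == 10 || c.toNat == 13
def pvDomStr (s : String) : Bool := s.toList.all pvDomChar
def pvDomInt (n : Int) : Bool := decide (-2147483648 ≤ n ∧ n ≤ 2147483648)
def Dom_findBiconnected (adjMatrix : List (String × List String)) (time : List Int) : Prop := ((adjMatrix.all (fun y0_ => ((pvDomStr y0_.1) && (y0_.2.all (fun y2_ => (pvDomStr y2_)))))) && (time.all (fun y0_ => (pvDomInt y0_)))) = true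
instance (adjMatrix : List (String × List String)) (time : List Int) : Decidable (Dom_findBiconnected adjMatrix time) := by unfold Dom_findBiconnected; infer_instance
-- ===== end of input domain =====

-- B replaces bccHelper's recursion by an iterative DFS over an explicit stack of enter/after/loop
-- frames (alternative decomposition, same cost); like A it mutates time[0] in place — the
-- equivalence proved here is about the return value.
-- Shared straight-line statement blocks (the SAME Python lines occur verbatim in A and in B):
-- state (disc/low/parent dicts, edge stack st, time counter) and its elementary updates.

structure BCState where
  disc : PySem.Dict String Int
  low : PySem.Dict String Int
  par : PySem.Dict String (Option String)
  st : List (String × String)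
  t : Int

-- disc[node] = time[0]; low[node] = time[0]; time[0] += 1
def bccEnter (node : String) (s : BCState) : BCState :=
  { s with disc := s.disc.insert node s.t, low := s.low.insert node s.t, t := s.t + 1 }

-- w = -1
-- while w != (node, v): w = st.pop()        (st's head is its Python top)
def popThrough (e : String × String) : List (String × String) → List (String × String)
  | [] => []
  | x :: rest => if x = e then rest else popThrough e rest

-- low[node] = min(low[node], low[v]); if parent[node]==-1 and children>1 or parent[node]!=-1 and low[v]>=disc[node]: pop loop
def bccAfterChild (node v : String) (children : Nat) (s : BCState) : BCState :=
  let s1 : BCState := { s with low := s.low.insert node (min (s.low.getD node (-1)) (s.low.getD v (-1))) }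
  if (s1.par.getD node none = none ∧ children > 1) ∨
     (s1.par.getD node none ≠ none ∧ s1.low.getD v (-1) ≥ s1.disc.getD node (-1)) then
    { s1 with st := popThrough (node, v) s1.st }
  else s1

-- parent[v] = node; st.append((node, v))
def bccChildPre (node v : String) (s : BCState) : BCState :=
  { s with par := s.par.insert v (some node), st := (node, v) :: s.st }

-- low[node] = min(low[node], disc[v]); st.append((node, v))
def bccBackUpd (node v : String) (s : BCState) : BCState :=
  { s with low := s.low.insert node (min (s.low.getD node (-1)) (s.disc.getD v (-1))),
           st := (node, v) :: s.st }

-- the initialisation loop: for key in adjMatrix.keys(): disc[key] = parent[key] = low[key] = -1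
def bccInit (adj : PySem.Dict String (List String)) (time : List Int) : BCState :=
  let d := adj.keys.foldl
    (fun (acc : PySem.Dict String Int × PySem.Dict String (Option String) × PySem.Dict String Int) k =>
      (acc.1.insert k (-1), acc.2.1.insert k none, acc.2.2.insert k (-1)))
    (PySem.Dict.empty, PySem.Dict.empty, PySem.Dict.empty)
  { disc := d.1, par := d.2.1, low := d.2.2, st := [], t := time.headD 0 }

-- ===== PORT A =====
-- A's recursive bccHelper; the Nat argument is recursion fuel (a totality guard: depth is
-- bounded by the number of DFS entries, far below 2*|adjMatrix|+4 on any input).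
mutual
def bccHelper (adj : PySem.Dict String (List String)) : Nat → String → BCState → BCState
  | 0, _, s => s
  | f+1, node, s => bccLoop adj f node (adj.getD node []) 0 (bccEnter node s)
  termination_by f _ _ => (f, 0)
-- for v in adjMatrix.get(node): …
def bccLoop (adj : PySem.Dict String (List String)) : Nat → String → List String → Nat → BCState → BCState
  | _, _, [], _, s => s
  | f, node, v :: rest, c, s =>
    if s.disc.getD v (-1) = -1 then
      bccLoop adj f node rest (c+1) (bccAfterChild node v (c+1) (bccHelper adj f v (bccChildPre node v s)))
    else if s.par.getD node none ≠ some v ∧ s.low.getD node (-1) > s.low.getD v (-1) then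
      bccLoop adj f node rest c (bccBackUpd node v s)
    else
      bccLoop adj f node rest c s
  termination_by f _ ns _ _ => (f, ns.length + 1)
end

def findBiconnected (adjMatrix : List (String × List String)) (time : List Int) : List (String × String) :=
  let adj := PySem.Dict.ofList adjMatrix
  (adj.keys.foldl
    (fun (acc : BCState × List (String × String)) key =>
      let s := if acc.1.disc.getD key (-1) = -1
               then bccHelper adj (2 * adjMatrix.length + 4) key acc.1
               else acc.1
      ({ s with st := [] }, acc.2 ++ s.st))
    (bccInit adj time, [])).2

-- ===== PORT B =====
-- B's explicit DFS stack: its Python frames ('enter',node) / ('after',node,v,children) /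
-- ('loop',node,remaining-neighbours,children); the Nat in enter/loop is the same recursion
-- fuel as in port A (totality guard), threaded per frame.
inductive BCFrame where
  | enter : Nat → String → BCFrame
  | after : String → String → Nat → BCFrame
  | loop : Nat → String → List String → Nat → BCFrame
deriving Repr

-- termination measure for `run`: pvK bounds every neighbour-list length, pvE/pvW weigh a frame
def pvK (adj : PySem.Dict String (List String)) : Nat :=
  adj.values.foldl (fun m l => max m l.length) 0

def pvE (K : Nat) : Nat → Nat
  | 0 => 1
  | f+1 => K * (pvE K f + 2) + 2

def pvW (K : Nat) : BCFrame → Nat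
  | .enter f _ => pvE K f
  | .after _ _ _ => 1
  | .loop f _ ns _ => ns.length * (pvE K f + 2) + 1

theorem pvE_pos (K f : Nat) : 0 < pvE K f := by
  cases f <;> simp [pvE]

theorem len_getD_le_pvK (adj : PySem.Dict String (List String)) (v : String) :
    (adj.getD v []).length ≤ pvK adj := by
  rcases h : adj.get? v with _ | l
  · rw [PySem.Dict.getD_of_get?_eq_none _ _ h]; exact Nat.zero_le _
  · rw [PySem.Dict.getD_of_get?_eq_some _ _ h]
    have hl : l ∈ adj.values := by
      have := PySem.Dict.mem_items_of_get?_eq_some _ h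
      simp only [PySem.Dict.values]
      exact List.mem_map.mpr ⟨(v, l), this, rfl⟩
    have : l.length ∈ adj.values.map List.length := List.mem_map.mpr ⟨l, hl, rfl⟩
    unfold pvK
    rw [← List.foldl_map]
    exact (PySem.List.le_foldl_max _ _).2 _ this

-- while frames: fr = frames.pop(); …      (frames' head is its Python top)
def run (adj : PySem.Dict String (List String)) : List BCFrame → BCState → BCState
  | [], s => s
  | .enter f v :: fs, s =>
    if f = 0 then run adj fs s  -- fuel guard only
    else run adj (.loop (f-1) v (adj.getD v []) 0 :: fs) (bccEnter v s)
  | .after node v c :: fs, s => run adj fs (bccAfterChild node v c s)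
  | .loop _ _ [] _ :: fs, s => run adj fs s
  | .loop f node (v :: rest) c :: fs, s =>
    if s.disc.getD v (-1) = -1 then
      run adj (.enter f v :: .after node v (c+1) :: .loop f node rest (c+1) :: fs) (bccChildPre node v s)
    else if s.par.getD node none ≠ some v ∧ s.low.getD node (-1) > s.low.getD v (-1) then
      run adj (.loop f node rest c :: fs) (bccBackUpd node v s)
    else
      run adj (.loop f node rest c :: fs) s
termination_by fs _ => (fs.map (pvW (pvK adj))).sum
decreasing_by
  · simp only [List.map, List.sum_cons, pvW]
    have := pvE_pos (pvK adj) f; omega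
  · rename_i h
    simp only [List.map, List.sum_cons, pvW]
    have hlen := len_getD_le_pvK adj v
    have hmul : (adj.getD v []).length * (pvE (pvK adj) (f-1) + 2) ≤ pvK adj * (pvE (pvK adj) (f-1) + 2) :=
      Nat.mul_le_mul_right _ hlen
    have hE : pvE (pvK adj) f = pvK adj * (pvE (pvK adj) (f-1) + 2) + 2 := by
      cases f with
      | zero => omega
      | succ f' => simp [pvE]
    omega
  · simp only [List.map, List.sum_cons, pvW]; omega
  · simp only [List.map, List.sum_cons, pvW]; omega
  · simp only [List.map, List.sum_cons, pvW, Nat.succ_mul, List.length_cons]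
    have := pvE_pos (pvK adj) f; omega
  · simp only [List.map, List.sum_cons, pvW, List.length_cons, Nat.succ_mul]
    have := pvE_pos (pvK adj) f; omega
  · simp only [List.map, List.sum_cons, pvW, List.length_cons, Nat.succ_mul]
    have := pvE_pos (pvK adj) f; omega

def findBiconnected_alt (adjMatrix : List (String × List String)) (time : List Int) : List (String × String) :=
  let adj := PySem.Dict.ofList adjMatrix
  (adj.keys.foldl
    (fun (acc : BCState × List (String × String)) key =>
      let s := if acc.1.disc.getD key (-1) = -1
               then run adj [BCFrame.enter (2 * adjMatrix.length + 4) key] acc.1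
               else acc.1
      ({ s with st := [] }, acc.2 ++ s.st))
    (bccInit adj time, [])).2

-- ===== PRECONDITION & SPEC =====
-- Pre_ excludes exactly the inputs on which Python A raises: IndexError reading time[0] when the
-- graph is nonempty but time is empty, and KeyError reading disc[v] when a neighbour v is not a key.
def Pre_findBiconnected (adjMatrix : List (String × List String)) (time : List Int) : Prop :=
  (adjMatrix = [] ∨ time ≠ []) ∧
  ∀ p ∈ (PySem.Dict.ofList adjMatrix).items, ∀ v ∈ p.2, v ∈ (PySem.Dict.ofList adjMatrix).keys
instance (adjMatrix : List (String × List String)) (time : List Int) : Decidable (Pre_findBiconnected adjMatrix time) := by unfold Pre_findBiconnected; infer_instance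

def pvWitness_findBiconnected : (List (String × List String)) × List Int :=
  ([("a", ["b", "c"]), ("b", ["a", "c"]), ("c", ["a", "b"])], [0])

def Spec_findBiconnected (adjMatrix : List (String × List String)) (time : List Int) (out : List (String × String)) : Prop := out = findBiconnected_alt adjMatrix time
instance (adjMatrix : List (String × List String)) (time : List Int) (out : List (String × String)) : Decidable (Spec_findBiconnected adjMatrix time out) := by unfold Spec_findBiconnected; infer_instance

-- ===== CLAIM (what is proved, stated in full; the proofs are below) =====
def Claim_equal_findBiconnected : Prop := ∀ (adjMatrix : List (String × List String)) (time : List Int), Dom_findBiconnected adjMatrix time → Pre_findBiconnected adjMatrix time → Spec_findBiconnected adjMatrix time (findBiconnected adjMatrix time)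

-- ===== LEMMAS AND PROOFS =====
-- the simulation: running the machine on an enter (resp. loop) frame atop any frame stack equals
-- first running A's bccHelper (resp. bccLoop) and then the rest of the stack
theorem run_sim (adj : PySem.Dict String (List String)) (f : Nat) :
    (∀ v s fs, run adj (.enter f v :: fs) s = run adj fs (bccHelper adj f v s)) ∧
    (∀ ns node c s fs, run adj (.loop f node ns c :: fs) s = run adj fs (bccLoop adj f node ns c s)) := by
  induction f with
  | zero =>
    have henter : ∀ v s fs, run adj (.enter 0 v :: fs) s = run adj fs (bccHelper adj 0 v s) := by
      intro v s fs; simp [run, bccHelper]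
    refine ⟨henter, ?_⟩
    intro ns
    induction ns with
    | nil => intro node c s fs; simp [run, bccLoop]
    | cons v rest ih =>
      intro node c s fs
      rw [run, bccLoop]
      split
      · rw [henter, run, ih]
      · split <;> rw [ih]
  | succ f ihf =>
    have henter : ∀ v s fs, run adj (.enter (f+1) v :: fs) s = run adj fs (bccHelper adj (f+1) v s) := by
      intro v s fs
      rw [run, bccHelper]
      simp only [Nat.add_sub_cancel, if_neg (Nat.succ_ne_zero f)]
      rw [ihf.2]
    refine ⟨henter, ?_⟩
    intro ns
    induction ns with
    | nil => intro node c s fs; simp [run, bccLoop]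
    | cons v rest ih =>
      intro node c s fs
      rw [run, bccLoop]
      split
      · rw [henter, run, ih]
      · split <;> rw [ih]

theorem run_one_enter (adj : PySem.Dict String (List String)) (f : Nat) (v : String) (s : BCState) :
    run adj [BCFrame.enter f v] s = bccHelper adj f v s := by
  rw [(run_sim adj f).1, run]

theorem ports_eq (adjMatrix : List (String × List String)) (time : List Int) :
    findBiconnected adjMatrix time = findBiconnected_alt adjMatrix time := by
  unfold findBiconnected findBiconnected_alt
  simp only [run_one_enter]

-- ===== VERDICT (by name: the statement is the Claim_ definition above) =====
theorem findBiconnected_spec : Claim_equal_findBiconnected := by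
  intro adjMatrix time _ _
  unfold Spec_findBiconnected
  exact ports_eq adjMatrix time
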